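-- pv_equiv track=rewrite | github.com/Noxville/advent-of-code-2023 | 13/a.py | solve
-- ===== SOURCE A (Python) =====
-- def solve(cs, allowed_wrong):
--     mx, my, spots = len(cs[0]), len(cs), set()
--
--     for y, line in enumerate(cs):
--         for x, c in enumerate(line):
--             if c == '#':
--                 spots.add((x, y))
--
--     score = 0
--     for c in range(mx - 1):
--         wrong = 0 #False
--         for dx in range(mx):
--             l, r = c - dx, 1 + c + dx
--             if r > l and l >= 0 and mx > r:
--                 for y in range(my):
--                     if ((l, y) in spots) != ((r, y) in spots):
--                         wrong += 1
--         if wrong == allowed_wrong: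
--             score += 1 + c
--
--     for r in range(my - 1):
--         wrong = 0
--         for dy in range(my):
--             u, d = r - dy, 1 + r + dy
--             if d > u and u >= 0 and my > d:
--                 for x in range(mx):
--                     if ((x, u) in spots) != ((x, d) in spots):
--                         wrong += 1
--         if wrong == allowed_wrong:
--             score += (1 + r) * 100
--     return score
-- ===== SOURCE B (Python) =====
-- def _axis_scores(vecs, allowed_wrong, weight):
--     # Bucket aggregation: one sweep over ALL ordered pairs (i, j), i < j; a pair with
--     # i + j odd is mirrored about the axis between (i+j-1)//2 and (i+j-1)//2 + 1, so
--     # its elementwise difference count is added into that axis's bucket.  An axis is a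
--     # valid reflection exactly when its bucket ends up equal to allowed_wrong.
--     n = len(vecs)
--     acc = [0] * max(n - 1, 0)
--     for i in range(n):
--         for j in range(i + 1, n):
--             if (i + j) % 2:
--                 acc[(i + j - 1) // 2] += sum(a != b for a, b in zip(vecs[i], vecs[j]))
--     return sum(weight * (1 + c) for c, w in enumerate(acc) if w == allowed_wrong)
--
--
-- def solve(cs, allowed_wrong):
--     mx = len(cs[0])
--     grid = [[x < len(line) and line[x] == '#' for x in range(mx)] for line in cs]
--     cols = [[row[x] for row in grid] for x in range(mx)]
--     return _axis_scores(cols, allowed_wrong, 1) + _axis_scores(grid, allowed_wrong, 100)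
-- ===== Notes on version B (the rewrite author's own statement) =====
-- stated objective: alternative
-- what changed: replaces A's per-axis outward mirrored scan over a coordinate hash set by a single sweep over all index pairs (i,j) that aggregates each odd-sum pair's difference count into a per-axis bucket array, scored afterwards in one enumerate pass
import Mathlib
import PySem

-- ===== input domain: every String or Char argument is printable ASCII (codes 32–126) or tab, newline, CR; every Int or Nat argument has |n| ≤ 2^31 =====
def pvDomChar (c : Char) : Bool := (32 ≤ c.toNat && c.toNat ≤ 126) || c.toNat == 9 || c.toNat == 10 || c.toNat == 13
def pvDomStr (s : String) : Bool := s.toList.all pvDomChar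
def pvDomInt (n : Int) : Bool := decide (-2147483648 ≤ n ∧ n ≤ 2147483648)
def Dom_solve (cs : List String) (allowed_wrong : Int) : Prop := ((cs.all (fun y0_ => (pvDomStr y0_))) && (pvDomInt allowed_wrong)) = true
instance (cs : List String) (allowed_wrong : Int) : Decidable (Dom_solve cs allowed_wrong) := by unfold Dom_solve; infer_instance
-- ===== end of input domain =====

-- B replaces A's per-axis outward mirrored scan over a hash set of '#' coordinates by a
-- single sweep over all index pairs that aggregates each odd-sum pair's difference count
-- into a per-axis bucket array, scored afterwards in one pass (alternative, similar cost).


-- ===== PORT A =====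
def solveSpots (cs : List String) : PySem.Set (Int × Int) :=
  (PySem.List.enumerate cs 0).foldl (fun spots yl =>
    (PySem.List.enumerate yl.2.toList 0).foldl (fun spots xc =>
      if xc.2 = '#' then PySem.Set.add spots (xc.1, yl.1) else spots) spots) PySem.Set.empty

def solveWrongV (spots : PySem.Set (Int × Int)) (mx my c : Int) : Int :=
  (PySem.List.pyRange 0 mx 1).foldl (fun wrong dx =>
    let l := c - dx
    let r := 1 + c + dx
    if r > l ∧ l ≥ 0 ∧ mx > r then
      (PySem.List.pyRange 0 my 1).foldl (fun wrong y =>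
        if PySem.Set.contains spots (l, y) ≠ PySem.Set.contains spots (r, y) then wrong + 1
        else wrong) wrong
    else wrong) 0

def solveWrongH (spots : PySem.Set (Int × Int)) (mx my r : Int) : Int :=
  (PySem.List.pyRange 0 my 1).foldl (fun wrong dy =>
    let u := r - dy
    let d := 1 + r + dy
    if d > u ∧ u ≥ 0 ∧ my > d then
      (PySem.List.pyRange 0 mx 1).foldl (fun wrong x =>
        if PySem.Set.contains spots (x, u) ≠ PySem.Set.contains spots (x, d) then wrong + 1
        else wrong) wrong
    else wrong) 0

def solve (cs : List String) (allowed_wrong : Int) : Int :=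
  match cs with
  | [] => 0  -- Python raises IndexError on cs[0]; excluded by Pre_solve
  | c0 :: _ =>
    let mx : Int := PySem.Str.len c0
    let my : Int := (cs.length : Int)
    let spots := solveSpots cs
    let score1 := (PySem.List.pyRange 0 (mx - 1) 1).foldl (fun score c =>
      if solveWrongV spots mx my c = allowed_wrong then score + (1 + c) else score) 0
    (PySem.List.pyRange 0 (my - 1) 1).foldl (fun score r =>
      if solveWrongH spots mx my r = allowed_wrong then score + (1 + r) * 100 else score) score1

-- ===== PORT B =====
def altRow (mx : Int) (line : String) : List Bool :=
  (PySem.List.pyRange 0 mx 1).map (fun x =>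
    if x < PySem.Str.len line then PySem.Str.pyGet? line x == some '#' else false)

-- sum(a != b for a, b in zip(u, v))
def bDiff (u v : List Bool) : Int :=
  (u.zip v).foldl (fun w ab => w + (if ab.1 ≠ ab.2 then 1 else 0)) 0

-- the body of B's inner pair loop: acc[(i+j-1)//2] += bDiff(vecs[i], vecs[j]) when (i+j) odd.
-- The bucket index (i+j-1)//2 is provably in [0, len acc) whenever the branch fires in the
-- actual program, where Python's acc[k] read/assignment returns; pyGetD/pySetD are exact there.
def bStep (vecs : List (List Bool)) (i : Int) (acc : List Int) (j : Int) : List Int :=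
  if PySem.Int.mod (i + j) 2 ≠ 0 then
    PySem.List.pySetD acc (PySem.Int.floordiv (i + j - 1) 2)
      (PySem.List.pyGetD acc (PySem.Int.floordiv (i + j - 1) 2) 0 +
        bDiff (PySem.List.pyGetD vecs i []) (PySem.List.pyGetD vecs j []))
  else acc

def bAxisScores (vecs : List (List Bool)) (allowed_wrong weight : Int) : Int :=
  let n : Int := (vecs.length : Int)
  let acc := (PySem.List.pyRange 0 n 1).foldl (fun acc i =>
    (PySem.List.pyRange (i + 1) n 1).foldl (bStep vecs i) acc)
    (List.replicate (max (n - 1) 0).toNat 0)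
  (PySem.List.enumerate acc).foldl (fun s cw =>
    if cw.2 = allowed_wrong then s + weight * (1 + cw.1) else s) 0

def solve_alt (cs : List String) (allowed_wrong : Int) : Int :=
  match cs with
  | [] => 0  -- Python raises IndexError on cs[0]; excluded by Pre_solve
  | c0 :: _ =>
    let mx : Int := PySem.Str.len c0
    let grid := cs.map (altRow mx)
    let cols := (PySem.List.pyRange 0 mx 1).map (fun x =>
      grid.map (fun row => PySem.List.pyGetD row x false))
    bAxisScores cols allowed_wrong 1 + bAxisScores grid allowed_wrong 100

-- ===== PRECONDITION & SPEC =====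
-- Pre_solve excludes only the empty grid, on which A raises IndexError (cs[0]).
def Pre_solve (cs : List String) (allowed_wrong : Int) : Prop := cs ≠ []
instance (cs : List String) (allowed_wrong : Int) : Decidable (Pre_solve cs allowed_wrong) := by
  unfold Pre_solve; infer_instance

def pvWitness_solve : List String × Int := (["#.#", "..#"], 1)

def Spec_solve (cs : List String) (allowed_wrong : Int) (out : Int) : Prop := out = solve_alt cs allowed_wrong
instance (cs : List String) (allowed_wrong : Int) (out : Int) : Decidable (Spec_solve cs allowed_wrong out) := by unfold Spec_solve; infer_instance

-- ===== CLAIM (what is proved, stated in full; the proofs are below) =====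
def Claim_equal_solve : Prop := ∀ (cs : List String) (allowed_wrong : Int), Dom_solve cs allowed_wrong → Pre_solve cs allowed_wrong → Spec_solve cs allowed_wrong (solve cs allowed_wrong)

-- ===== LEMMAS AND PROOFS =====

-- the sum f 0 + f 1 + … + f (k-1)
def pairSum (f : Nat → Int) : Nat → Int
  | 0 => 0
  | k + 1 => pairSum f k + f k

-- per-axis mismatch total: the common value both programs compute for axis c
def mism (vecs : List (List Bool)) (c : Int) : Int :=
  pairSum (fun d => bDiff (PySem.List.pyGetD vecs (c - (d : Int)) [])
    (PySem.List.pyGetD vecs (c + 1 + (d : Int)) []))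
    (min (c + 1) ((vecs.length : Int) - 1 - c)).toNat

theorem pairSum_congr (f g : Nat → Int) (k : Nat) (h : ∀ i, i < k → f i = g i) :
    pairSum f k = pairSum g k := by
  induction k with
  | zero => rfl
  | succ k ih =>
    simp only [pairSum, ih (fun i hi => h i (Nat.lt_succ_of_lt hi)), h k (Nat.lt_succ_self k)]

-- a guarded fold over range m where the guard is "index < k"
theorem foldl_guard_false {G : Nat → Prop} [DecidablePred G] (f : Nat → Int) (l : List Nat) (w : Int)
    (h : ∀ j ∈ l, ¬ G j) :
    l.foldl (fun w j => if G j then w + f j else w) w = w := by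
  induction l generalizing w with
  | nil => rfl
  | cons a l ih =>
    simp only [List.foldl_cons, if_neg (h a (List.mem_cons_self))]
    exact ih w (fun j hj => h j (List.mem_cons_of_mem a hj))

theorem foldl_guard_true {G : Nat → Prop} [DecidablePred G] (f : Nat → Int) (k : Nat) (w : Int)
    (h : ∀ j, j < k → G j) :
    (List.range k).foldl (fun w j => if G j then w + f j else w) w = w + pairSum f k := by
  induction k generalizing w with
  | zero => simp [pairSum]
  | succ k ih =>
    rw [List.range_succ, List.foldl_append]
    rw [ih w (fun j hj => h j (Nat.lt_succ_of_lt hj))]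
    simp only [List.foldl_cons, List.foldl_nil, if_pos (h k (Nat.lt_succ_self k)), pairSum]
    ring

theorem foldl_guard_range {G : Nat → Prop} [DecidablePred G] (f : Nat → Int) (m k : Nat)
    (hkm : k ≤ m) (hG : ∀ j, j < m → (G j ↔ j < k)) :
    (List.range m).foldl (fun w j => if G j then w + f j else w) 0 = pairSum f k := by
  obtain ⟨d, rfl⟩ : ∃ d, m = k + d := ⟨m - k, by omega⟩
  rw [List.range_add, List.foldl_append]
  rw [foldl_guard_true f k 0 (fun j hj => (hG j (by omega)).mpr hj)]
  rw [foldl_guard_false f _ _ (fun j hj => by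
    simp only [List.mem_map, List.mem_range] at hj
    obtain ⟨i, hi, rfl⟩ := hj
    exact fun hGj => absurd ((hG _ (by omega)).mp hGj) (by omega))]
  omega

-- membership in the inner character fold of solveSpots
theorem mem_charFold (yv : Int) (ln : List Char) :
    ∀ (s : Int) (sp : PySem.Set (Int × Int)) (a b : Int),
    ((a, b) ∈ (PySem.List.enumerate ln s).foldl
      (fun spots xc => if xc.2 = '#' then PySem.Set.add spots (xc.1, yv) else spots) sp)
    ↔ (a, b) ∈ sp ∨ (b = yv ∧ 0 ≤ a - s ∧ ln[(a - s).toNat]? = some '#') := by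
  induction ln with
  | nil =>
    intro s sp a b
    simp [PySem.List.enumerate]
  | cons c cst ih =>
    intro s sp a b
    have hcons : (b = yv ∧ 0 ≤ a - s ∧ (c :: cst)[(a - s).toNat]? = some '#')
        ↔ ((a = s ∧ b = yv ∧ c = '#') ∨
           (b = yv ∧ 0 ≤ a - (s + 1) ∧ cst[(a - (s + 1)).toNat]? = some '#')) := by
      constructor
      · rintro ⟨hb, h0, hg⟩
        by_cases has : a = s
        · subst has
          left
          refine ⟨rfl, hb, ?_⟩
          have ht : (a - a).toNat = 0 := by omega
          rw [ht] at hg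
          simpa using hg
        · right
          refine ⟨hb, by omega, ?_⟩
          have ht : (a - s).toNat = (a - (s + 1)).toNat + 1 := by omega
          rw [ht] at hg
          simpa using hg
      · rintro (⟨rfl, hb, hch⟩ | ⟨hb, h0, hg⟩)
        · refine ⟨hb, by omega, ?_⟩
          have ht : (a - a).toNat = 0 := by omega
          rw [ht]
          simp [hch]
        · refine ⟨hb, by omega, ?_⟩
          have ht : (a - s).toNat = (a - (s + 1)).toNat + 1 := by omega
          rw [ht]
          simpa using hg
    rw [PySem.List.enumerate_cons]
    simp only [List.foldl_cons]
    rw [ih (s + 1), hcons]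
    by_cases hch : c = '#'
    · simp only [hch, if_true, PySem.Set.mem_add, Prod.ext_iff]
      tauto
    · simp only [hch]
      tauto

-- membership in solveSpots' outer fold
theorem mem_spotsFold (cs : List String) :
    ∀ (s : Int) (sp : PySem.Set (Int × Int)) (a b : Int),
    ((a, b) ∈ (PySem.List.enumerate cs s).foldl
      (fun spots yl => (PySem.List.enumerate yl.2.toList 0).foldl
        (fun spots xc => if xc.2 = '#' then PySem.Set.add spots (xc.1, yl.1) else spots) spots) sp)
    ↔ (a, b) ∈ sp ∨ (0 ≤ b - s ∧ 0 ≤ a ∧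
        ∃ lnS : String, cs[(b - s).toNat]? = some lnS ∧ lnS.toList[a.toNat]? = some '#') := by
  induction cs with
  | nil =>
    intro s sp a b
    simp [PySem.List.enumerate]
  | cons ln cst ih =>
    intro s sp a b
    have hcons : (0 ≤ b - s ∧ 0 ≤ a ∧
          ∃ lnS : String, (ln :: cst)[(b - s).toNat]? = some lnS ∧ lnS.toList[a.toNat]? = some '#')
        ↔ ((b = s ∧ 0 ≤ a ∧ ln.toList[a.toNat]? = some '#') ∨
           (0 ≤ b - (s + 1) ∧ 0 ≤ a ∧
            ∃ lnS : String, cst[(b - (s + 1)).toNat]? = some lnS ∧ lnS.toList[a.toNat]? = some '#')) := by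
      constructor
      · rintro ⟨h0, ha, lnS, hsome, hg⟩
        by_cases hbs : b = s
        · subst hbs
          left
          have ht : (b - b).toNat = 0 := by omega
          rw [ht] at hsome
          simp only [List.getElem?_cons_zero, Option.some.injEq] at hsome
          subst hsome
          exact ⟨rfl, ha, hg⟩
        · right
          refine ⟨by omega, ha, lnS, ?_, hg⟩
          have ht : (b - s).toNat = (b - (s + 1)).toNat + 1 := by omega
          rw [ht] at hsome
          simpa using hsome
      · rintro (⟨rfl, ha, hg⟩ | ⟨h0, ha, lnS, hsome, hg⟩)
        · refine ⟨by omega, ha, ln, ?_, hg⟩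
          have ht : (b - b).toNat = 0 := by omega
          rw [ht]
          simp
        · refine ⟨by omega, ha, lnS, ?_, hg⟩
          have ht : (b - s).toNat = (b - (s + 1)).toNat + 1 := by omega
          rw [ht]
          simpa using hsome
    rw [PySem.List.enumerate_cons]
    simp only [List.foldl_cons]
    rw [ih (s + 1), mem_charFold, hcons]
    have ht : (a - 0).toNat = a.toNat := by omega
    rw [ht, sub_zero]
    tauto

-- the B-side cell value: exactly altRow's element function
def valB (ln : String) (x : Int) : Bool :=
  if x < PySem.Str.len ln then PySem.Str.pyGet? ln x == some '#' else false

theorem altRow_eq (mx : Int) (ln : String) :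
    altRow mx ln = (PySem.List.pyRange 0 mx 1).map (fun x => valB ln x) := rfl

theorem contains_spots (cs : List String) (x y : Int) (hx : 0 ≤ x) (hy : 0 ≤ y)
    (hylt : y < (cs.length : Int)) :
    PySem.Set.contains (solveSpots cs) (x, y) = valB (PySem.List.pyGetD cs y "") x := by
  have hynat : y.toNat < cs.length := by omega
  have hget : PySem.List.pyGetD cs y "" = cs[y.toNat] :=
    PySem.List.pyGetD_eq_getElem cs "" hy hylt
  rw [Bool.eq_iff_iff]
  have hmem : PySem.Set.contains (solveSpots cs) (x, y) = true ↔ (x, y) ∈ solveSpots cs :=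
    List.contains_iff_mem
  rw [hmem]
  unfold solveSpots
  rw [mem_spotsFold]
  rw [hget]
  have hxcast : x = ((x.toNat : Nat) : Int) := by omega
  constructor
  · rintro (h | ⟨h0, ha, lnS, hsome, hg⟩)
    · simp [PySem.Set.empty] at h
    · have ht : (y - 0).toNat = y.toNat := by omega
      rw [ht] at hsome
      rw [List.getElem?_eq_getElem hynat, Option.some.injEq] at hsome
      have hlen : x.toNat < lnS.toList.length := (List.getElem?_eq_some_iff.mp hg).1
      rw [← hsome] at hlen hg
      unfold valB
      rw [if_pos (by rw [PySem.Str.len_eq]; omega)]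
      rw [hxcast, PySem.Str.pyGet?_natCast]
      simp [hg]
  · intro hv
    unfold valB at hv
    split at hv
    · right
      rename_i hlt
      rw [hxcast, PySem.Str.pyGet?_natCast] at hv
      refine ⟨by omega, hx, cs[y.toNat], ?_, by simpa using hv⟩
      have ht : (y - 0).toNat = y.toNat := by omega
      rw [ht]
      simp [hynat]
    · simp at hv

def gridOf (cs : List String) (mx : Int) : List (List Bool) := cs.map (altRow mx)

def colsOf (cs : List String) (mx : Int) : List (List Bool) :=
  (PySem.List.pyRange 0 mx 1).map (fun x => (gridOf cs mx).map (fun row => PySem.List.pyGetD row x false))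

theorem bDiff_eq (u v : List Bool) :
    bDiff u v = ((u.zip v).map (fun ab => if ab.1 ≠ ab.2 then (1 : Int) else 0)).sum := by
  unfold bDiff
  rw [PySem.List.foldl_add (u.zip v) (fun ab => if ab.1 ≠ ab.2 then (1 : Int) else 0) 0]
  omega

theorem foldl_ite_count {α : Type} (P : α → Prop) [DecidablePred P] (l : List α) (w : Int) :
    l.foldl (fun w y => if P y then w + 1 else w) w
      = w + (l.map (fun y => if P y then (1 : Int) else 0)).sum := by
  rw [PySem.List.foldl_congr_mem l _ (fun w y => w + (if P y then (1 : Int) else 0)) w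
      (fun acc x _ => by by_cases h : P x <;> simp [h])]
  exact PySem.List.foldl_add l _ w

theorem col_entry (cs : List String) (mx t : Int) (h0 : 0 ≤ t) (h1 : t < mx) :
    PySem.List.pyGetD (colsOf cs mx) t [] = cs.map (fun ln => valB ln t) := by
  unfold colsOf
  rw [PySem.List.pyGetD_map_pyRange_of_nonneg _ mx t [] h0 h1]
  unfold gridOf
  rw [List.map_map]
  apply List.map_congr_left
  intro ln _
  simp only [Function.comp]
  rw [altRow_eq]
  exact PySem.List.pyGetD_map_pyRange_of_nonneg _ mx t false h0 h1

theorem pairV (cs : List String) (mx l r : Int) (hl0 : 0 ≤ l) (hlm : l < mx)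
    (hr0 : 0 ≤ r) (hrm : r < mx) :
    ((PySem.List.pyRange 0 (cs.length : Int) 1).map (fun y =>
        if PySem.Set.contains (solveSpots cs) (l, y) ≠ PySem.Set.contains (solveSpots cs) (r, y)
        then (1 : Int) else 0)).sum
    = bDiff (PySem.List.pyGetD (colsOf cs mx) l []) (PySem.List.pyGetD (colsOf cs mx) r []) := by
  rw [col_entry cs mx l hl0 hlm, col_entry cs mx r hr0 hrm]
  rw [bDiff_eq, List.zip_map', List.map_map]
  have hL : (PySem.List.pyRange 0 (cs.length : Int) 1).map (fun y =>
        if PySem.Set.contains (solveSpots cs) (l, y) ≠ PySem.Set.contains (solveSpots cs) (r, y)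
        then (1 : Int) else 0)
      = (PySem.List.pyRange 0 (cs.length : Int) 1).map (fun y =>
          (fun ln => if valB ln l ≠ valB ln r then (1 : Int) else 0) (PySem.List.pyGetD cs y "")) := by
    apply List.map_congr_left
    intro y hy
    rw [PySem.List.mem_pyRange_one] at hy
    rw [contains_spots cs l y hl0 hy.1 hy.2, contains_spots cs r y hr0 hy.1 hy.2]
  rw [hL]
  have h3 : ∀ (g : String → Int),
      (List.map (fun y => g (PySem.List.pyGetD cs y "")) (PySem.List.pyRange 0 (cs.length : Int) 1))
        = cs.map g := by
    intro g
    conv_rhs => rw [← PySem.List.map_pyGetD_pyRange_zero' cs ""]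
    exact (List.map_map).symm
  rw [h3 (fun ln => if valB ln l ≠ valB ln r then (1 : Int) else 0)]
  apply congrArg List.sum
  apply List.map_congr_left
  intro ln _
  simp only [Function.comp]

theorem row_entry (cs : List String) (mx t : Int) (h0 : 0 ≤ t) (h1 : t < (cs.length : Int)) :
    PySem.List.pyGetD (gridOf cs mx) t [] = altRow mx (PySem.List.pyGetD cs t "") := by
  unfold gridOf
  have h1' : t < ((cs.map (altRow mx)).length : Int) := by simpa using h1
  rw [PySem.List.pyGetD_eq_getElem _ [] h0 h1', List.getElem_map,
    PySem.List.pyGetD_eq_getElem cs "" h0 h1]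

theorem pairH (cs : List String) (mx u d : Int) (hu0 : 0 ≤ u) (hum : u < (cs.length : Int))
    (hd0 : 0 ≤ d) (hdm : d < (cs.length : Int)) :
    ((PySem.List.pyRange 0 mx 1).map (fun x =>
        if PySem.Set.contains (solveSpots cs) (x, u) ≠ PySem.Set.contains (solveSpots cs) (x, d)
        then (1 : Int) else 0)).sum
    = bDiff (PySem.List.pyGetD (gridOf cs mx) u []) (PySem.List.pyGetD (gridOf cs mx) d []) := by
  rw [row_entry cs mx u hu0 hum, row_entry cs mx d hd0 hdm]
  rw [bDiff_eq, altRow_eq, altRow_eq, List.zip_map', List.map_map]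
  apply congrArg List.sum
  apply List.map_congr_left
  intro x hx
  rw [PySem.List.mem_pyRange_one] at hx
  simp only [Function.comp]
  rw [contains_spots cs x u hx.1 hu0 hum, contains_spots cs x d hx.1 hd0 hdm]

theorem colsOf_len (cs : List String) (mx : Int) (hmx : 0 ≤ mx) :
    ((colsOf cs mx).length : Int) = mx := by
  unfold colsOf
  rw [List.length_map, PySem.List.length_pyRange_one]
  omega

theorem gridOf_len (cs : List String) (mx : Int) :
    ((gridOf cs mx).length : Int) = (cs.length : Int) := by
  unfold gridOf
  rw [List.length_map]

-- ===== A-side: each per-axis scan equals mism =====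

theorem axisV (cs : List String) (mx c : Int) (hmx : 0 ≤ mx) (hc0 : 0 ≤ c) (hc1 : c < mx - 1) :
    solveWrongV (solveSpots cs) mx (cs.length : Int) c = mism (colsOf cs mx) c := by
  unfold solveWrongV
  simp only []
  rw [PySem.List.pyRange_zero mx, List.foldl_map]
  rw [PySem.List.foldl_congr_mem _ _ (fun (w : Int) (j : Nat) =>
        if 1 + c + (j : Int) > c - (j : Int) ∧ c - (j : Int) ≥ 0 ∧ mx > 1 + c + (j : Int)
        then w + ((PySem.List.pyRange 0 (cs.length : Int) 1).map (fun y =>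
            if PySem.Set.contains (solveSpots cs) (c - (j : Int), y) ≠
               PySem.Set.contains (solveSpots cs) (1 + c + (j : Int), y)
            then (1 : Int) else 0)).sum
        else w) 0
      (fun acc j _ => by
        simp only []
        by_cases hG : 1 + c + (j : Int) > c - (j : Int) ∧ c - (j : Int) ≥ 0 ∧ mx > 1 + c + (j : Int)
        · rw [if_pos hG, if_pos hG]
          exact foldl_ite_count _ _ acc
        · rw [if_neg hG, if_neg hG])]
  rw [foldl_guard_range _ mx.toNat (min (c + 1) (mx - 1 - c)).toNat (by omega)
      (fun j _ => by omega)]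
  unfold mism
  rw [colsOf_len cs mx hmx]
  apply pairSum_congr
  intro i hi
  have hi' : (i : Int) < min (c + 1) (mx - 1 - c) := by omega
  have h1 : c + 1 + (i : Int) = 1 + c + (i : Int) := by ring
  rw [h1]
  exact pairV cs mx (c - (i : Int)) (1 + c + (i : Int)) (by omega) (by omega) (by omega) (by omega)

theorem axisH (cs : List String) (mx r : Int) (hr0 : 0 ≤ r) (hr1 : r < (cs.length : Int) - 1) :
    solveWrongH (solveSpots cs) mx (cs.length : Int) r = mism (gridOf cs mx) r := by
  unfold solveWrongH
  simp only []
  rw [PySem.List.pyRange_zero (cs.length : Int), List.foldl_map]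
  rw [PySem.List.foldl_congr_mem _ _ (fun (w : Int) (j : Nat) =>
        if 1 + r + (j : Int) > r - (j : Int) ∧ r - (j : Int) ≥ 0 ∧ (cs.length : Int) > 1 + r + (j : Int)
        then w + ((PySem.List.pyRange 0 mx 1).map (fun x =>
            if PySem.Set.contains (solveSpots cs) (x, r - (j : Int)) ≠
               PySem.Set.contains (solveSpots cs) (x, 1 + r + (j : Int))
            then (1 : Int) else 0)).sum
        else w) 0
      (fun acc j _ => by
        simp only []
        by_cases hG : 1 + r + (j : Int) > r - (j : Int) ∧ r - (j : Int) ≥ 0 ∧ (cs.length : Int) > 1 + r + (j : Int)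
        · rw [if_pos hG, if_pos hG]
          exact foldl_ite_count _ _ acc
        · rw [if_neg hG, if_neg hG])]
  rw [foldl_guard_range _ (cs.length : Int).toNat (min (r + 1) ((cs.length : Int) - 1 - r)).toNat (by omega)
      (fun j _ => by omega)]
  unfold mism
  rw [gridOf_len cs mx]
  apply pairSum_congr
  intro i hi
  have hi' : (i : Int) < min (r + 1) ((cs.length : Int) - 1 - r) := by omega
  have h1 : r + 1 + (i : Int) = 1 + r + (i : Int) := by ring
  rw [h1]
  exact pairH cs mx (r - (i : Int)) (1 + r + (i : Int)) (by omega) (by omega) (by omega) (by omega)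

-- ===== B-side: the bucket-array fold computes mism =====

theorem bStep_length (vecs : List (List Bool)) (i : Int) (acc : List Int) (j : Int) :
    (bStep vecs i acc j).length = acc.length := by
  unfold bStep
  split
  · exact PySem.List.length_pySetD acc _ _
  · rfl

theorem innerFold_length (vecs : List (List Bool)) (i : Int) :
    ∀ (l : List Int) (acc : List Int), (l.foldl (bStep vecs i) acc).length = acc.length := by
  intro l
  induction l with
  | nil => intro acc; rfl
  | cons a l ih => intro acc; rw [List.foldl_cons, ih, bStep_length]

theorem bStep_getD (vecs : List (List Bool)) (i j c : Int) (acc : List Int)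
    (hij : 0 ≤ i + j - 1) (hc0 : 0 ≤ c) (hclen : c < (acc.length : Int)) :
    PySem.List.pyGetD (bStep vecs i acc j) c 0
      = PySem.List.pyGetD acc c 0 +
        (if i + j = 2 * c + 1 then
          bDiff (PySem.List.pyGetD vecs i []) (PySem.List.pyGetD vecs j []) else 0) := by
  unfold bStep
  by_cases hm : PySem.Int.mod (i + j) 2 ≠ 0
  · rw [if_pos hm]
    rw [PySem.Int.mod_eq_emod_of_pos (by omega : (0:Int) < 2)] at hm
    have hk0 : 0 ≤ PySem.Int.floordiv (i + j - 1) 2 := by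
      rw [PySem.Int.floordiv_eq_ediv_of_pos (by omega : (0:Int) < 2)]
      omega
    rw [PySem.List.pySetD_of_nonneg acc _ hk0]
    have hlen' : c < ((acc.set (PySem.Int.floordiv (i + j - 1) 2).toNat
        (PySem.List.pyGetD acc (PySem.Int.floordiv (i + j - 1) 2) 0 +
          bDiff (PySem.List.pyGetD vecs i []) (PySem.List.pyGetD vecs j []))).length : Int) := by
      rw [List.length_set]; exact hclen
    rw [PySem.List.pyGetD_eq_getElem _ 0 hc0 hlen', PySem.List.pyGetD_eq_getElem acc 0 hc0 hclen]
    rw [List.getElem_set]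
    have hkval : PySem.Int.floordiv (i + j - 1) 2 = (i + j - 1) / 2 :=
      PySem.Int.floordiv_eq_ediv_of_pos (by omega)
    by_cases heq : i + j = 2 * c + 1
    · have hkc : (PySem.Int.floordiv (i + j - 1) 2).toNat = c.toNat := by
        rw [hkval]; omega
      rw [if_pos hkc, if_pos heq]
      have hkc' : PySem.Int.floordiv (i + j - 1) 2 = c := by rw [hkval]; omega
      rw [hkc', PySem.List.pyGetD_eq_getElem acc 0 hc0 hclen]
    · have hkc : ¬ (PySem.Int.floordiv (i + j - 1) 2).toNat = c.toNat := by
        rw [hkval]; omega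
      rw [if_neg hkc, if_neg heq, add_zero]
  · rw [if_neg hm]
    rw [not_not] at hm
    rw [PySem.Int.mod_eq_emod_of_pos (by omega : (0:Int) < 2)] at hm
    rw [if_neg (by omega : ¬ i + j = 2 * c + 1), add_zero]

theorem innerFold_getD (vecs : List (List Bool)) (i b : Int) (hi : 0 ≤ i) :
    ∀ (m : Nat) (a : Int) (acc : List Int) (c : Int), (b - a).toNat = m → i < a → 0 ≤ c →
      c < (acc.length : Int) →
    PySem.List.pyGetD ((PySem.List.pyRange a b 1).foldl (bStep vecs i) acc) c 0
      = PySem.List.pyGetD acc c 0 +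
        (if a ≤ 2 * c + 1 - i ∧ 2 * c + 1 - i < b then
          bDiff (PySem.List.pyGetD vecs i []) (PySem.List.pyGetD vecs (2 * c + 1 - i) []) else 0) := by
  intro m
  induction m with
  | zero =>
    intro a acc c hm ha hc0 hclen
    rw [PySem.List.pyRange_one_eq_nil (by omega : b ≤ a)]
    rw [List.foldl_nil, if_neg (by omega), add_zero]
  | succ m ih =>
    intro a acc c hm ha hc0 hclen
    rw [PySem.List.pyRange_one_cons (by omega : a < b), List.foldl_cons]
    rw [ih (a + 1) (bStep vecs i acc a) c (by omega) (by omega) hc0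
        (by rw [bStep_length]; exact hclen)]
    rw [bStep_getD vecs i a c acc (by omega) hc0 hclen]
    by_cases h1 : i + a = 2 * c + 1
    · have hsub : 2 * c + 1 - i = a := by omega
      rw [hsub, if_pos h1, if_neg (by omega), if_pos (by omega)]
      ring
    · rw [if_neg h1, add_zero]
      by_cases h2 : a + 1 ≤ 2 * c + 1 - i ∧ 2 * c + 1 - i < b
      · rw [if_pos h2, if_pos (by omega)]
      · rw [if_neg h2, if_neg (by omega)]

theorem outerFold_getD (vecs : List (List Bool)) (n : Int) :
    ∀ (m : Nat) (a : Int) (acc : List Int) (c : Int), (n - a).toNat = m → 0 ≤ a → 0 ≤ c →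
      c < n - 1 → c < (acc.length : Int) →
    PySem.List.pyGetD ((PySem.List.pyRange a n 1).foldl (fun acc i =>
        (PySem.List.pyRange (i + 1) n 1).foldl (bStep vecs i) acc) acc) c 0
      = PySem.List.pyGetD acc c 0 +
        pairSum (fun d => bDiff (PySem.List.pyGetD vecs (c - (d : Int)) [])
          (PySem.List.pyGetD vecs (c + 1 + (d : Int)) []))
          (min (c + 1 - a) (n - 1 - c)).toNat := by
  intro m
  induction m with
  | zero =>
    intro a acc c hm ha hc0 hc1 hclen
    rw [PySem.List.pyRange_one_eq_nil (by omega : n ≤ a), List.foldl_nil]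
    have h0 : (min (c + 1 - a) (n - 1 - c)).toNat = 0 := by omega
    rw [h0]
    simp [pairSum]
  | succ m ih =>
    intro a acc c hm ha hc0 hc1 hclen
    rw [PySem.List.pyRange_one_cons (by omega : a < n), List.foldl_cons]
    rw [ih (a + 1) _ c (by omega) (by omega) hc0 hc1
        (by rw [innerFold_length]; exact hclen)]
    rw [innerFold_getD vecs a n ha ((n - (a + 1)).toNat) (a + 1) acc c rfl (by omega) hc0 hclen]
    by_cases hcond : a + 1 ≤ 2 * c + 1 - a ∧ 2 * c + 1 - a < n
    · rw [if_pos hcond]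
      have hK : (min (c + 1 - a) (n - 1 - c)).toNat = (min (c + 1 - (a + 1)) (n - 1 - c)).toNat + 1 := by
        omega
      have hK2 : (min (c + 1 - (a + 1)) (n - 1 - c)).toNat = (c - a).toNat := by omega
      rw [hK, hK2]
      have hterm : pairSum (fun d => bDiff (PySem.List.pyGetD vecs (c - (d : Int)) [])
            (PySem.List.pyGetD vecs (c + 1 + (d : Int)) [])) ((c - a).toNat + 1)
          = pairSum (fun d => bDiff (PySem.List.pyGetD vecs (c - (d : Int)) [])
            (PySem.List.pyGetD vecs (c + 1 + (d : Int)) [])) ((c - a).toNat)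
            + bDiff (PySem.List.pyGetD vecs (c - ((c - a).toNat : Int)) [])
              (PySem.List.pyGetD vecs (c + 1 + ((c - a).toNat : Int)) []) := rfl
      rw [hterm]
      have e1 : c - ((c - a).toNat : Int) = a := by omega
      have e2 : c + 1 + ((c - a).toNat : Int) = 2 * c + 1 - a := by omega
      rw [e1, e2]
      ring
    · rw [if_neg hcond, add_zero]
      have hK : (min (c + 1 - a) (n - 1 - c)).toNat = (min (c + 1 - (a + 1)) (n - 1 - c)).toNat := by
        omega
      rw [hK]

theorem getD_replicate_zero (m : Nat) (c : Int) (hc0 : 0 ≤ c) (hclen : c < (m : Int)) :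
    PySem.List.pyGetD (List.replicate m (0 : Int)) c 0 = 0 := by
  have hlen : c < ((List.replicate m (0 : Int)).length : Int) := by
    rw [List.length_replicate]; exact hclen
  rw [PySem.List.pyGetD_eq_getElem _ 0 hc0 hlen, List.getElem_replicate]

-- shift a guarded accumulating fold to a sum of indicators
theorem foldl_if_add_eq_sum (P : Int → Prop) [DecidablePred P] (g : Int → Int) (l : List Int)
    (s0 : Int) :
    l.foldl (fun s c => if P c then s + g c else s) s0
      = s0 + (l.map (fun c => if P c then g c else 0)).sum := by
  rw [PySem.List.foldl_congr_mem l _ (fun s c => s + (if P c then g c else 0)) s0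
      (fun acc x _ => by by_cases h : P x <;> simp [h])]
  exact PySem.List.foldl_add l _ s0

theorem bAxisScores_eq (vecs : List (List Bool)) (aw w : Int) :
    bAxisScores vecs aw w = (PySem.List.pyRange 0 ((vecs.length : Int) - 1) 1).foldl
      (fun s c => if mism vecs c = aw then s + w * (1 + c) else s) 0 := by
  unfold bAxisScores
  simp only []
  set n : Int := (vecs.length : Int) with hn
  have hn0 : 0 ≤ n := by rw [hn]; exact Int.natCast_nonneg _
  set accF := (PySem.List.pyRange 0 n 1).foldl (fun acc i =>
      (PySem.List.pyRange (i + 1) n 1).foldl (bStep vecs i) acc)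
      (List.replicate (max (n - 1) 0).toNat 0) with haccF
  have hlenF : (accF.length : Int) = max (n - 1) 0 := by
    rw [haccF]
    have : ∀ (l : List Int) (acc : List Int),
        ((l.foldl (fun acc i => (PySem.List.pyRange (i + 1) n 1).foldl (bStep vecs i) acc) acc).length
          = acc.length) := by
      intro l
      induction l with
      | nil => intro acc; rfl
      | cons a l ih => intro acc; rw [List.foldl_cons, ih, innerFold_length]
    rw [this, List.length_replicate]
    omega
  rw [PySem.List.enumerate_eq_map_pyRange accF 0, List.foldl_map]
  simp only [PySem.List.len_eq]
  rw [hlenF]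
  have hrange : PySem.List.pyRange 0 (max (n - 1) 0) 1 = PySem.List.pyRange 0 (n - 1) 1 := by
    by_cases h1 : 1 ≤ n
    · have : max (n - 1) 0 = n - 1 := by omega
      rw [this]
    · rw [PySem.List.pyRange_one_eq_nil (by omega), PySem.List.pyRange_one_eq_nil (by omega)]
  rw [hrange]
  apply PySem.List.foldl_congr_mem
  intro acc c hc
  rw [PySem.List.mem_pyRange_one] at hc
  have hgetD : PySem.List.pyGetD accF c 0 = mism vecs c := by
    rw [haccF]
    rw [outerFold_getD vecs n ((n - 0).toNat) 0 _ c rfl (by omega) hc.1 (by omega)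
        (by rw [List.length_replicate]; omega)]
    rw [getD_replicate_zero _ c hc.1 (by omega)]
    unfold mism
    rw [← hn]
    have : c + 1 - 0 = c + 1 := by ring
    rw [this, zero_add]
  rw [hgetD]

-- ===== VERDICT (by name: the statement is the Claim_ definition above) =====
theorem solve_spec : Claim_equal_solve := by
  unfold Claim_equal_solve
  intro cs aw _ hpre
  unfold Spec_solve
  obtain ⟨c0, rest, rfl⟩ : ∃ c0 rest, cs = c0 :: rest := by
    cases cs with
    | nil => exact absurd rfl hpre
    | cons c0 rest => exact ⟨c0, rest, rfl⟩
  unfold solve solve_alt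
  simp only []
  have hmx : (0 : Int) ≤ PySem.Str.len c0 := by
    rw [PySem.Str.len_eq]
    exact Int.natCast_nonneg _
  have hgrid : List.map (altRow (PySem.Str.len c0)) (c0 :: rest)
      = gridOf (c0 :: rest) (PySem.Str.len c0) := rfl
  rw [hgrid]
  have hcols : List.map (fun x => List.map (fun row => PySem.List.pyGetD row x false)
        (gridOf (c0 :: rest) (PySem.Str.len c0))) (PySem.List.pyRange 0 (PySem.Str.len c0) 1)
      = colsOf (c0 :: rest) (PySem.Str.len c0) := rfl
  rw [hcols]
  rw [bAxisScores_eq, bAxisScores_eq]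
  rw [colsOf_len (c0 :: rest) (PySem.Str.len c0) hmx, gridOf_len (c0 :: rest) (PySem.Str.len c0)]
  rw [foldl_if_add_eq_sum (fun c => solveWrongV (solveSpots (c0 :: rest)) (PySem.Str.len c0)
        ((c0 :: rest).length : Int) c = aw) (fun c => 1 + c) _ 0]
  rw [foldl_if_add_eq_sum (fun r => solveWrongH (solveSpots (c0 :: rest)) (PySem.Str.len c0)
        ((c0 :: rest).length : Int) r = aw) (fun r => (1 + r) * 100) _ _]
  rw [foldl_if_add_eq_sum (fun c => mism (colsOf (c0 :: rest) (PySem.Str.len c0)) c = aw)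
        (fun c => 1 * (1 + c)) _ 0]
  rw [foldl_if_add_eq_sum (fun r => mism (gridOf (c0 :: rest) (PySem.Str.len c0)) r = aw)
        (fun r => 100 * (1 + r)) _ 0]
  have hV : List.map (fun c => if solveWrongV (solveSpots (c0 :: rest)) (PySem.Str.len c0)
        ((c0 :: rest).length : Int) c = aw then 1 + c else 0)
        (PySem.List.pyRange 0 (PySem.Str.len c0 - 1) 1)
      = List.map (fun c => if mism (colsOf (c0 :: rest) (PySem.Str.len c0)) c = aw
        then 1 * (1 + c) else 0) (PySem.List.pyRange 0 (PySem.Str.len c0 - 1) 1) := by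
    apply List.map_congr_left
    intro c hc
    rw [PySem.List.mem_pyRange_one] at hc
    rw [axisV (c0 :: rest) (PySem.Str.len c0) c hmx hc.1 hc.2, one_mul]
  have hH : List.map (fun r => if solveWrongH (solveSpots (c0 :: rest)) (PySem.Str.len c0)
        ((c0 :: rest).length : Int) r = aw then (1 + r) * 100 else 0)
        (PySem.List.pyRange 0 (((c0 :: rest).length : Int) - 1) 1)
      = List.map (fun r => if mism (gridOf (c0 :: rest) (PySem.Str.len c0)) r = aw
        then 100 * (1 + r) else 0) (PySem.List.pyRange 0 (((c0 :: rest).length : Int) - 1) 1) := by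
    apply List.map_congr_left
    intro r hr
    rw [PySem.List.mem_pyRange_one] at hr
    rw [axisH (c0 :: rest) (PySem.Str.len c0) r hr.1 hr.2, mul_comm]
  rw [hV, hH]
  ring
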